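-- pv_equiv track=rewrite | github.com/miliar/Code_Jam_Webscraper | solutions_python/solutions_year15_round0_nr1/1073.py | solve
-- ===== SOURCE A (Python) =====
-- def solve(p):
--     f = 0
--     a = 0
--     for sl,np in enumerate(p):
--         if sl>a:
--             f += (sl-a)
--             a += (sl-a)
--         a += np
--
--     return f
-- ===== SOURCE B (Python) =====
-- def solve(p):
--     # Staged passes: first materialize the prefix-sum table, then take the
--     # largest deficit i - prefix[i] (0 for an empty input) with a single max().
--     pre = [0]
--     for x in p:
--         pre.append(pre[-1] + x)
--     return max((i - s for i, s in zip(range(len(p)), pre)), default=0)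
-- ===== Notes on version B (the rewrite author's own statement) =====
-- stated objective: alternative
-- what changed: Replaces A's single-pass self-correcting accumulator (which feeds its own bumps back into the running total) with two staged passes: first materialize the prefix-sum table, then one max() over the deficits i - prefix[i].
import Mathlib
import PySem

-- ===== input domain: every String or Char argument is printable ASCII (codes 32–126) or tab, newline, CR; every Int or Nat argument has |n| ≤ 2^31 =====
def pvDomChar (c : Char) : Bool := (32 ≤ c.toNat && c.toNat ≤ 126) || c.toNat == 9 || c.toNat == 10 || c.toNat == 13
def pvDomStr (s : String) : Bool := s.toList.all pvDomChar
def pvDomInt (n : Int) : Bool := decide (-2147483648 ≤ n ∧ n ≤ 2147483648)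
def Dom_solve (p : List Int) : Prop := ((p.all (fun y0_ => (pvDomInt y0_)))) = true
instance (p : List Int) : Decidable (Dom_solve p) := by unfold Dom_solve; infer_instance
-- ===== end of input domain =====

-- B replaces A's single-pass self-correcting accumulator with two staged passes:
-- materialize the prefix-sum table, then one max() over the deficits i - prefix[i]
-- (objective: alternative decomposition, same O(n) cost).


-- ===== PORT A =====
-- for sl, np in enumerate(p): if sl > a: f += sl-a; a += sl-a;  a += np
def solve (p : List Int) : Int :=
  ((PySem.List.enumerate p 0).foldl
    (fun (st : Int × Int) ix =>
      let f := st.1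
      let a := st.2
      let (f, a) := if ix.1 > a then (f + (ix.1 - a), a + (ix.1 - a)) else (f, a)
      (f, a + ix.2))
    (0, 0)).1

-- ===== PORT B =====
-- pre = [0]; for x in p: pre.append(pre[-1] + x)
-- return max((i - s for i, s in zip(range(len(p)), pre)), default=0)
def solve_alt (p : List Int) : Int :=
  let pre := p.foldl (fun (acc : List Int) x => acc ++ [(acc.getLast?.getD 0) + x]) [0]
  let defs := ((List.range p.length).zip pre).map (fun q => ((q.1 : Int) - q.2))
  (PySem.List.max? defs (fun y => y)).getD 0

-- ===== PRECONDITION & SPEC =====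
def Spec_solve (p : List Int) (out : Int) : Prop := out = solve_alt p
instance (p : List Int) (out : Int) : Decidable (Spec_solve p out) := by unfold Spec_solve; infer_instance

-- ===== CLAIM (what is proved, stated in full; the proofs are below) =====
def Claim_equal_solve : Prop := ∀ (p : List Int), Dom_solve p → Spec_solve p (solve p)

-- ===== LEMMAS AND PROOFS =====

-- running sums of l starting from s (the tail of B's prefix table)
def pvScanFrom (s : Int) : List Int → List Int
  | [] => []
  | x :: t => (s + x) :: pvScanFrom (s + x) t

-- the deficit list i - prefix_i, index starting at i, prefix sum starting at s
def pvDefsFrom (i s : Int) : List Int → List Int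
  | [] => []
  | x :: t => (i - s) :: pvDefsFrom (i + 1) (s + x) t

-- A's fold computes the running max of the deficits (with a = s + f invariant)
theorem pvA_eq_maxfold (l : List Int) (i f s : Int) :
    ((PySem.List.enumerate l i).foldl
      (fun (st : Int × Int) ix =>
        let f := st.1
        let a := st.2
        let (f, a) := if ix.1 > a then (f + (ix.1 - a), a + (ix.1 - a)) else (f, a)
        (f, a + ix.2))
      (f, s + f)).1 = (pvDefsFrom i s l).foldl max f := by
  induction l generalizing i f s with
  | nil => rfl
  | cons x t ih =>
    rw [PySem.List.enumerate_cons]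
    simp only [List.foldl_cons, pvDefsFrom]
    by_cases h : i > s + f
    · have hmax : max f (i - s) = i - s := by omega
      have h1 : (f + (i - (s + f)), s + f + (i - (s + f)) + x)
          = (i - s, (s + x) + (i - s)) := by rw [Prod.mk.injEq]; constructor <;> ring
      simp only [if_pos h, h1, hmax]
      exact ih (i + 1) (i - s) (s + x)
    · have hmax : max f (i - s) = f := by omega
      have h1 : s + f + x = (s + x) + f := by ring
      simp only [if_neg h, h1, hmax]
      exact ih (i + 1) f (s + x)

-- B's first pass builds the prefix-sum table
theorem pvBuild_eq_scan (l : List Int) (acc : List Int) (s : Int)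
    (h : acc.getLast?.getD 0 = s) :
    l.foldl (fun (acc : List Int) x => acc ++ [(acc.getLast?.getD 0) + x]) acc
      = acc ++ pvScanFrom s l := by
  induction l generalizing acc s with
  | nil => simp [pvScanFrom]
  | cons x t ih =>
    simp only [List.foldl_cons, h, pvScanFrom]
    have h2 : (acc ++ [s + x]).getLast?.getD 0 = s + x := by
      simp [List.getLast?_append]
    rw [ih (acc ++ [s + x]) (s + x) h2, List.append_assoc]
    rfl

-- B's zip/map over the table yields exactly the deficit list
theorem pvZip_eq_defs (l : List Int) (i : Nat) (s : Int) :
    (((List.range' i l.length).zip (s :: pvScanFrom s l)).map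
        (fun q => ((q.1 : Int) - q.2))) = pvDefsFrom (i : Int) s l := by
  induction l generalizing i s with
  | nil => rfl
  | cons x t ih =>
    simp only [List.length_cons, List.range'_succ, List.zip_cons_cons, List.map_cons,
      pvScanFrom, pvDefsFrom]
    rw [ih (i + 1) (s + x)]
    push_cast
    rfl

-- ===== VERDICT (by name: the statement is the Claim_ definition above) =====
theorem solve_spec : Claim_equal_solve := by
  intro p _
  show solve p = solve_alt p
  unfold solve solve_alt
  have ha := pvA_eq_maxfold p 0 0 0
  simp only [add_zero] at ha
  have hz := pvZip_eq_defs p 0 0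
  push_cast at hz
  rw [ha, pvBuild_eq_scan p [0] 0 rfl]
  simp only [List.singleton_append, List.range_eq_range', hz]
  cases p with
  | nil => rfl
  | cons x t =>
    simp only [pvDefsFrom, sub_zero, zero_add, List.foldl_cons]
    rw [PySem.List.max?_id_cons]
    simp
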